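-- pv_equiv track=rewrite | github.com/sumsar158/Python-2021 | EXAM/exam3/exam.py | count_camel_case_words
-- ===== SOURCE A (Python) =====
-- def count_camel_case_words(text: str) -> int:
--     """
--     Count the words in the text.
--
--     The text uses camel case. There are no spaces between words.
--     Each new word starts with a capital letter.
--     The first word can start with a small or a capital letter.
--
--     count_camel_case_words("hello") => 1
--     count_camel_case_words("") => 0
--     count_camel_case_words("helloWorld") => 2
--     count_camel_case_words("HelloWorld") => 2
--     count_camel_case_words("aBC") => 3
--     count_camel_case_words("ABC") => 3
--     count_camel_case_words("a") => 1
--     count_camel_case_words("What") => 1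
--     """
--     if text == "":
--         return 0
--
--     if text[0].isupper():
--         x = 0
--     else:
--         x = 1
--
--     for letter in text:
--         if letter.isupper():
--             x += 1
--     return x
-- ===== SOURCE B (Python) =====
-- def count_camel_case_words(text: str) -> int:
--     # Segment the text into the actual camel-case words, then count them:
--     # each uppercase letter closes the current word (if any) and starts a new one.
--     words = []
--     current = ""
--     for c in text:
--         if c.isupper():
--             if current:
--                 words.append(current)
--             current = c
--         else:
--             current += c
--     if current:
--         words.append(current)
--     return len(words)
-- ===== Notes on version B (the rewrite author's own statement) =====
-- stated objective: alternative
-- what changed: Instead of counting uppercase letters with a first-char branch adjustment, B actually segments the string into its camel-case words (accumulating the current word, closing it at each uppercase letter) and returns the length of the word list.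
import Mathlib
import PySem

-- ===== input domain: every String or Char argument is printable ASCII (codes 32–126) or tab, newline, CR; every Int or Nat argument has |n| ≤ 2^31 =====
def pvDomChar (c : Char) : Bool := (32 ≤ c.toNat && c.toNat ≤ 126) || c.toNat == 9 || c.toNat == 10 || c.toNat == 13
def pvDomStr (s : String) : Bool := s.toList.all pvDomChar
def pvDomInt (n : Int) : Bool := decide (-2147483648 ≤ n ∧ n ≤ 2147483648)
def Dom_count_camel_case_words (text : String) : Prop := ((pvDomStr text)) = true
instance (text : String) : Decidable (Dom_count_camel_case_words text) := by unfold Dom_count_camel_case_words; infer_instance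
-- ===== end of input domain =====

-- B segments the text into its camel-case word list and returns its length, instead of A's branch-adjusted uppercase count.


-- ===== PORT A =====
def count_camel_case_words (text : String) : Int :=
  if text.toList = [] then 0
  else
    let x : Int :=
      match PySem.Str.pyGet? text 0 with
      | some c => if PySem.Chars.isupper c then 0 else 1
      | none => 0   -- unreachable: text is non-empty
    text.toList.foldl (fun x letter => if PySem.Chars.isupper letter then x + 1 else x) x

-- ===== PORT B =====
-- B's strings (the word being built, the finished words) are ported as List Char;
-- 'current += c' is 'cur ++ [c]' and 'if current:' is 'cur ≠ []' — exact on all strings.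
def pvAltStep (st : List (List Char) × List Char) (c : Char) : List (List Char) × List Char :=
  if PySem.Chars.isupper c then
    (if st.2 ≠ [] then st.1 ++ [st.2] else st.1, [c])
  else
    (st.1, st.2 ++ [c])

def count_camel_case_words_alt (text : String) : Int :=
  let st := text.toList.foldl pvAltStep ([], [])
  let words := if st.2 ≠ [] then st.1 ++ [st.2] else st.1
  (words.length : Int)

-- ===== PRECONDITION & SPEC =====
def Spec_count_camel_case_words (text : String) (out : Int) : Prop := out = count_camel_case_words_alt text
instance (text : String) (out : Int) : Decidable (Spec_count_camel_case_words text out) := by unfold Spec_count_camel_case_words; infer_instance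

-- ===== CLAIM (what is proved, stated in full; the proofs are below) =====
def Claim_equal_count_camel_case_words : Prop := ∀ (text : String), Dom_count_camel_case_words text → Spec_count_camel_case_words text (count_camel_case_words text)

-- ===== LEMMAS AND PROOFS =====

-- final word count of B's fold, starting from a non-empty current word:
-- words so far + one new word per uppercase letter + the trailing word.
theorem pvAlt_invariant (l : List Char) : ∀ (w : List (List Char)) (cur : List Char), cur ≠ [] →
    (((if (l.foldl pvAltStep (w, cur)).2 ≠ [] then
        (l.foldl pvAltStep (w, cur)).1 ++ [(l.foldl pvAltStep (w, cur)).2]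
      else (l.foldl pvAltStep (w, cur)).1).length : Int))
      = (w.length : Int) + (l.countP PySem.Chars.isupper : Int) + 1 := by
  induction l with
  | nil => intro w cur hc; simp [hc]
  | cons c t ih =>
    intro w cur hc
    by_cases hu : PySem.Chars.isupper c = true
    · rw [List.foldl_cons,
        show pvAltStep (w, cur) c = (w ++ [cur], [c]) from by simp [pvAltStep, hu, hc],
        ih (w ++ [cur]) [c] (by simp)]
      simp [List.countP_cons, hu]; push_cast; ring
    · rw [List.foldl_cons,
        show pvAltStep (w, cur) c = (w, cur ++ [c]) from by simp [pvAltStep, hu],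
        ih w (cur ++ [c]) (by simp)]
      simp [List.countP_cons, hu]

-- ===== VERDICT (by name: the statement is the Claim_ definition above) =====
theorem count_camel_case_words_spec : Claim_equal_count_camel_case_words := by
  intro text _
  unfold Spec_count_camel_case_words count_camel_case_words count_camel_case_words_alt
  cases h : text.toList with
  | nil => simp [h]
  | cons c t =>
    simp only [h, reduceCtorEq, ite_false, if_false]
    rw [show PySem.Str.pyGet? text 0 = some c from by
      simp [PySem.Str.pyGet?, h, PySem.List.pyGet?, PySem.List.pyIdx?]]
    rw [PySem.List.foldl_if_add_one]
    have hstep : pvAltStep ([], []) c = ([], [c]) := by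
      by_cases hu : PySem.Chars.isupper c = true <;> simp [pvAltStep, hu]
    have hinv := pvAlt_invariant t [] [c] (by simp)
    simp only [List.foldl_cons, hstep, List.length_nil] at hinv ⊢
    simp only [hinv, List.countP_cons]
    by_cases hu : PySem.Chars.isupper c = true <;> simp [hu] <;> push_cast <;> ring
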